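-- pv_equiv track=rewrite | github.com/yil384/PettingLLMs | pettingllms/trainer/utils.py | build_reverse_mapping
-- ===== SOURCE A (Python) =====
-- from math import prod
-- from typing import List, Dict, Iterator, Tuple, Optional
--
-- def compute_strides(sizes: List[int]) -> List[int]:
--     """Row-major（最后一维变化最快）的stride。"""
--     n = len(sizes)
--     strides = [1] * n
--     for i in range(n - 2, -1, -1):
--         strides[i] = strides[i + 1] * sizes[i + 1]
--     return strides
--
-- def build_reverse_mapping(
--     agent_names: List[str],
--     sizes: List[int],
--     batch_size: int,
-- ) -> Dict[str, List[Dict[str, object]]]: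
--     total = prod(sizes)
--     strides = compute_strides(sizes)
--     out: Dict[str, List[Dict[str, object]]] = {}
--     total=1
--     for _ in sizes:
--         total*=_
--
--     for batch_idx in range(batch_size):
--         out[batch_idx] = {}
--         for i, name in enumerate(agent_names):
--             stride = strides[i]
--             period = sizes[i] * stride
--             items = []
--             for s in range(sizes[i]):
--                 starts = list(range(s * stride, total, period))
--
--                 rollouts = []
--                 for st in starts:
--                     rollouts.extend(range(st+batch_idx*total, st+batch_idx*total + stride))
--                 entry= rollouts
--                 items.append(entry)
--             out[batch_idx][name] = items
--     return out
-- ===== SOURCE B (Python) =====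
-- def compute_strides(sizes):
--     n = len(sizes)
--     strides = [1] * n
--     for i in range(n - 2, -1, -1):
--         strides[i] = strides[i + 1] * sizes[i + 1]
--     return strides
--
-- def build_reverse_mapping(agent_names, sizes, batch_size):
--     total = 1
--     for sz in sizes:
--         total *= sz
--     strides = compute_strides(sizes)
--     out = {}
--     for batch_idx in range(batch_size):
--         agents = {}
--         off = batch_idx * total
--         for i, name in enumerate(agent_names):
--             stride = strides[i]
--             size = sizes[i]
--             buckets = {}
--             if size > 0:
--                 for j in range(total):
--                     buckets.setdefault((j // stride) % size, []).append(j + off)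
--             agents[name] = [buckets.get(s, []) for s in range(size)]
--         out[batch_idx] = agents
--     return out
-- ===== Notes on version B (the rewrite author's own statement) =====
-- stated objective: alternative
-- what changed: A generates each bucket separately from arithmetic ranges (for every coordinate s it enumerates starts range(s*stride, total, period) and extends with a stride-long range); B makes one pass over j in range(total) and dispatches j+batch_idx*total into bucket (j // stride) % size via a dict, then reads the buckets out in coordinate order.
import Mathlib
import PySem

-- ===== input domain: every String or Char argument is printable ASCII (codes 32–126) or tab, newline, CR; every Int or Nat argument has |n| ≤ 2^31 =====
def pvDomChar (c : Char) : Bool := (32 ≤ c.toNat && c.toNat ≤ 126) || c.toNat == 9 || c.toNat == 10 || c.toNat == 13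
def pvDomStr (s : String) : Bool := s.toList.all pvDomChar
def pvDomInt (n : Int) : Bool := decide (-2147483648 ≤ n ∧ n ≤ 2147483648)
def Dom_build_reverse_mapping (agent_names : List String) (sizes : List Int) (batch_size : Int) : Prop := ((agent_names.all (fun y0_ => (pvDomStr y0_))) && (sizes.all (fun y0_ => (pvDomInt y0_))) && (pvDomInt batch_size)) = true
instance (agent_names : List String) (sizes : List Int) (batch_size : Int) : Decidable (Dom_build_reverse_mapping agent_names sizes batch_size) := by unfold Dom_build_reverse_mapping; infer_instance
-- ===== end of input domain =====

-- B replaces A's per-coordinate generation of each bucket from stepped ranges by a single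
-- pass over range(total) that dispatches every index into bucket (j // stride) % size via a dict
-- (objective: alternative decomposition, same asymptotic cost).

-- ===== PORT A =====
-- helper shared by both Pythons (Source B carries the identical compute_strides);
-- the loop writes positions n-2 … 0, so i.toNat and the in-range pyGetD defaults are exact here
def compute_strides (sizes : List Int) : List Int :=
  let n : Int := sizes.length
  let strides : List Int := List.replicate sizes.length 1
  (PySem.List.pyRange (n - 2) (-1) (-1)).foldl
    (fun st i =>
      st.set i.toNat (PySem.List.pyGetD st (i + 1) 0 * PySem.List.pyGetD sizes (i + 1) 0))
    strides

def build_reverse_mapping (agent_names : List String) (sizes : List Int) (batch_size : Int) : List (Int × List (String × List (List Int))) :=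
  let _total := sizes.foldl (fun a b => a * b) 1      -- total = prod(sizes)  (overwritten below, as in A)
  let strides := compute_strides sizes
  let total := sizes.foldl (fun t s => t * s) 1       -- total = 1; for _ in sizes: total *= _
  let out : PySem.Dict Int (PySem.Dict String (List (List Int))) :=
    (PySem.List.pyRange 0 batch_size 1).foldl (fun out batch_idx =>
      let inner : PySem.Dict String (List (List Int)) :=
        (PySem.List.enumerate agent_names).foldl (fun d p =>
          let stride := PySem.List.pyGetD strides p.1 0   -- in range on Pre_
          let period := PySem.List.pyGetD sizes p.1 0 * stride
          let items : List (List Int) :=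
            (PySem.List.pyRange 0 (PySem.List.pyGetD sizes p.1 0) 1).foldl (fun items s =>
              let starts := PySem.List.pyRange (s * stride) total period
              let rollouts := starts.foldl (fun r st =>
                r ++ PySem.List.pyRange (st + batch_idx * total) (st + batch_idx * total + stride) 1) []
              items ++ [rollouts]) []
          d.insert p.2 items) PySem.Dict.empty
      out.insert batch_idx inner) PySem.Dict.empty
  out.items.map (fun p => (p.1, p.2.items))

-- ===== PORT B =====
def build_reverse_mapping_alt (agent_names : List String) (sizes : List Int) (batch_size : Int) : List (Int × List (String × List (List Int))) :=
  let total := sizes.foldl (fun t s => t * s) 1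
  let strides := compute_strides sizes
  let out : PySem.Dict Int (PySem.Dict String (List (List Int))) :=
    (PySem.List.pyRange 0 batch_size 1).foldl (fun out batch_idx =>
      let off := batch_idx * total
      let agents : PySem.Dict String (List (List Int)) :=
        (PySem.List.enumerate agent_names).foldl (fun ag p =>
          let stride := PySem.List.pyGetD strides p.1 0   -- in range on Pre_
          let size := PySem.List.pyGetD sizes p.1 0
          -- Python's O(1) list.append is rendered as cons with a final reverse at readout,
          -- so the port evaluates in linear time; each bucket equals its Python value exactly
          let buckets : PySem.Dict Int (List Int) :=
            if 0 < size then
              (PySem.List.pyRange 0 total 1).foldl (fun b j =>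
                b.modify (PySem.Int.mod (PySem.Int.floordiv j stride) size) [] (fun v => (j + off) :: v))
                PySem.Dict.empty
            else PySem.Dict.empty
          ag.insert p.2 ((PySem.List.pyRange 0 size 1).map (fun s => (buckets.getD s []).reverse))) PySem.Dict.empty
      out.insert batch_idx agents) PySem.Dict.empty
  out.items.map (fun p => (p.1, p.2.items))

-- ===== PRECONDITION & SPEC =====
-- Pre_ admits every input with batch_size <= 0 (A's loops never run) and otherwise excludes
-- exactly: more agent names than sizes (A raises IndexError), an indexed positive size whose
-- suffix product is zero (A raises ValueError: range() arg 3 must not be zero), and an indexed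
-- positive size with a negative suffix stride while the total product is positive — there A's
-- all-empty buckets are an accident of empty stepped ranges over negative "dimension sizes"
-- that B's one-pass dispatch does not reproduce.
def Pre_build_reverse_mapping (agent_names : List String) (sizes : List Int) (batch_size : Int) : Prop :=
  0 < batch_size →
    (agent_names.length ≤ sizes.length ∧
      ∀ i : Nat, i < agent_names.length → 0 < PySem.List.pyGetD sizes (i : Int) 0 →
        ((sizes.drop (i + 1)).prod ≠ 0 ∧ (0 < sizes.prod → 0 < (sizes.drop (i + 1)).prod)))
instance (agent_names : List String) (sizes : List Int) (batch_size : Int) : Decidable (Pre_build_reverse_mapping agent_names sizes batch_size) := by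
  unfold Pre_build_reverse_mapping; infer_instance

def pvWitness_build_reverse_mapping : List String × List Int × Int := (["x", "y"], [2, 3], 2)

def Spec_build_reverse_mapping (agent_names : List String) (sizes : List Int) (batch_size : Int) (out : List (Int × List (String × List (List Int)))) : Prop := out = build_reverse_mapping_alt agent_names sizes batch_size
instance (agent_names : List String) (sizes : List Int) (batch_size : Int) (out : List (Int × List (String × List (List Int)))) : Decidable (Spec_build_reverse_mapping agent_names sizes batch_size out) := by unfold Spec_build_reverse_mapping; infer_instance

-- ===== CLAIM (what is proved, stated in full; the proofs are below) =====
def Claim_equal_build_reverse_mapping : Prop := ∀ (agent_names : List String) (sizes : List Int) (batch_size : Int), Dom_build_reverse_mapping agent_names sizes batch_size → Pre_build_reverse_mapping agent_names sizes batch_size → Spec_build_reverse_mapping agent_names sizes batch_size (build_reverse_mapping agent_names sizes batch_size)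

-- ===== LEMMAS AND PROOFS =====

theorem map_add_pyRange_one (a b off : Int) :
    (PySem.List.pyRange a b 1).map (fun j => j + off) = PySem.List.pyRange (a + off) (b + off) 1 := by
  rw [PySem.List.pyRange_one, PySem.List.pyRange_one, List.map_map]
  have h : b + off - (a + off) = b - a := by ring
  rw [h]
  apply List.map_congr_left
  intro k _
  simp [Function.comp]; ring

-- a positive-step range whose stop is a multiple of the step, in map form
theorem pyRange_step_char (a step : Int) (hs : 0 < step) (ha : 0 ≤ a) (hlt : a < step) (k : Nat) :
    PySem.List.pyRange a (k * step) step = (List.range k).map (fun q : Nat => a + step * (q : Int)) := by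
  have hcount : (if a < (k : Int) * step then (((k : Int) * step - a + step - 1) / step).toNat else 0) = k := by
    rcases Nat.eq_zero_or_pos k with hk | hk
    · subst hk; simp only [Nat.cast_zero, zero_mul]
      rw [if_neg (by omega)]
    · have hk1 : (1 : Int) ≤ (k : Int) := by exact_mod_cast hk
      have hak : a < (k : Int) * step := by nlinarith
      rw [if_pos hak]
      have h2 : (k : Int) * step - a + step - 1 = (step - a - 1) + (k : Int) * step := by ring
      rw [h2, Int.add_mul_ediv_right _ _ (by omega : step ≠ 0),
          Int.ediv_eq_zero_of_lt (by omega) (by omega)]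
      simp
  rw [PySem.List.pyRange_of_pos _ _ hs, hcount]

-- filtering a unit range by an interval contained in it yields the sub-range
theorem filter_pyRange_interval (a b lo hi : Int) (h1 : a ≤ lo) (h2 : lo ≤ hi) (h3 : hi ≤ b) :
    (PySem.List.pyRange a b 1).filter (fun j => decide (lo ≤ j) && decide (j < hi)) =
      PySem.List.pyRange lo hi 1 := by
  rw [PySem.List.pyRange_one_append a lo b h1 (le_trans h2 h3),
      PySem.List.pyRange_one_append lo hi b h2 h3, List.filter_append, List.filter_append]
  have e1 : (PySem.List.pyRange a lo 1).filter (fun j => decide (lo ≤ j) && decide (j < hi)) = [] := by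
    apply List.filter_eq_nil_iff.mpr
    intro j hj
    have := (PySem.List.mem_pyRange_one).mp hj
    simp; omega
  have e2 : (PySem.List.pyRange lo hi 1).filter (fun j => decide (lo ≤ j) && decide (j < hi)) = PySem.List.pyRange lo hi 1 := by
    apply List.filter_eq_self.mpr
    intro j hj
    have := (PySem.List.mem_pyRange_one).mp hj
    simp; omega
  have e3 : (PySem.List.pyRange hi b 1).filter (fun j => decide (lo ≤ j) && decide (j < hi)) = [] := by
    apply List.filter_eq_nil_iff.mpr
    intro j hj
    have := (PySem.List.mem_pyRange_one).mp hj
    simp; omega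
  rw [e1, e2, e3]; simp

-- on the block [k*(m*d), k*(m*d)+m*d) the dispatch coordinate test is an interval test
theorem coord_iff (d m s j : Int) (k : Nat) (hd : 0 < d) (hm : 0 < m)
    (hj1 : (k : Int) * (m * d) ≤ j) (hj2 : j < (k : Int) * (m * d) + m * d) :
    (PySem.Int.mod (PySem.Int.floordiv j d) m == s) =
      (decide ((k : Int) * (m * d) + s * d ≤ j) && decide (j < (k : Int) * (m * d) + s * d + d)) := by
  rw [PySem.Int.floordiv_eq_ediv_of_pos hd, PySem.Int.mod_eq_emod_of_pos hm]
  have hK : ((k : Int) * m) * d = (k : Int) * (m * d) := by ring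
  have hq1 : (k : Int) * m ≤ j / d := (Int.le_ediv_iff_mul_le hd).mpr (by rw [hK]; exact hj1)
  have hq2 : j / d < (k : Int) * m + m := (Int.ediv_lt_iff_lt_mul hd).mpr (by nlinarith)
  have e1 : (j / d) % m = (j / d - (k : Int) * m) % m := by
    conv_lhs => rw [show j / d = (j / d - (k : Int) * m) + m * (k : Int) from by ring]
    rw [Int.add_mul_emod_self_left]
  have hmod : (j / d) % m = j / d - (k : Int) * m := by
    rw [e1, Int.emod_eq_of_lt (by omega) (by omega)]
  have hiff : ((j / d) % m = s) ↔ ((k : Int) * (m * d) + s * d ≤ j ∧ j < (k : Int) * (m * d) + s * d + d) := by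
    rw [hmod]
    constructor
    · intro h
      have hq : j / d = (k : Int) * m + s := by omega
      have h1 : ((k : Int) * m + s) * d ≤ j := by
        rw [← hq]; exact (Int.le_ediv_iff_mul_le hd).mp (le_refl _)
      have h2 : j < ((k : Int) * m + s + 1) * d :=
        (Int.ediv_lt_iff_lt_mul hd).mp (by omega : j / d < (k : Int) * m + s + 1)
      constructor <;> nlinarith
    · intro ⟨h1, h2⟩
      have h1' : ((k : Int) * m + s) * d ≤ j := by nlinarith
      have h2' : j < ((k : Int) * m + s + 1) * d := by nlinarith
      have hq1' : (k : Int) * m + s ≤ j / d := (Int.le_ediv_iff_mul_le hd).mpr h1'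
      have hq2' : j / d < (k : Int) * m + s + 1 := (Int.ediv_lt_iff_lt_mul hd).mpr h2'
      omega
  have hb : ((j / d) % m == s) = decide ((k : Int) * (m * d) + s * d ≤ j ∧ j < (k : Int) * (m * d) + s * d + d) := by
    rw [Bool.eq_iff_iff]; simp [hiff]
  rw [hb]; simp

-- the heart: A's stepped-range bucket equals B's filtered-range bucket
theorem bucket_eq (d m off : Int) (hd : 0 < d) (hm : 0 < m) (k : Nat)
    (s : Int) (hs : 0 ≤ s) (hsm : s < m) :
    (PySem.List.pyRange (s * d) ((k : Int) * (m * d)) (m * d)).flatMap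
        (fun st => PySem.List.pyRange (st + off) (st + off + d) 1) =
      ((PySem.List.pyRange 0 ((k : Int) * (m * d)) 1).filter
          (fun j => PySem.Int.mod (PySem.Int.floordiv j d) m == s)).map (fun j => j + off) := by
  have hmd : 0 < m * d := by positivity
  have hsd0 : 0 ≤ s * d := by positivity
  have hsdlt : s * d < m * d := by nlinarith
  induction k with
  | zero =>
    simp only [Nat.cast_zero, zero_mul]
    rw [PySem.List.pyRange_of_pos _ _ hmd, if_neg (by omega),
        PySem.List.pyRange_one_eq_nil (le_refl 0)]
    simp
  | succ k ih =>
    have hT0 : (0 : Int) ≤ (k : Int) * (m * d) := by positivity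
    have hc : ((k + 1 : Nat) : Int) * (m * d) = (k : Int) * (m * d) + m * d := by push_cast; ring
    have hsplitA : PySem.List.pyRange (s * d) (((k + 1 : Nat) : Int) * (m * d)) (m * d)
        = PySem.List.pyRange (s * d) ((k : Int) * (m * d)) (m * d) ++ [s * d + (m * d) * k] := by
      rw [pyRange_step_char _ _ hmd hsd0 hsdlt (k + 1), pyRange_step_char _ _ hmd hsd0 hsdlt k,
          List.range_succ, List.map_append]
      simp
    have hsplitB : PySem.List.pyRange 0 (((k + 1 : Nat) : Int) * (m * d)) 1
        = PySem.List.pyRange 0 ((k : Int) * (m * d)) 1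
          ++ PySem.List.pyRange ((k : Int) * (m * d)) (((k + 1 : Nat) : Int) * (m * d)) 1 := by
      apply PySem.List.pyRange_one_append _ _ _ hT0 (by rw [hc]; omega)
    rw [hsplitA, hsplitB, List.flatMap_append, List.filter_append, List.map_append, ih]
    congr 1
    have hpred : (PySem.List.pyRange ((k : Int) * (m * d)) (((k + 1 : Nat) : Int) * (m * d)) 1).filter
          (fun j => PySem.Int.mod (PySem.Int.floordiv j d) m == s)
        = (PySem.List.pyRange ((k : Int) * (m * d)) (((k + 1 : Nat) : Int) * (m * d)) 1).filter
          (fun j => decide ((k : Int) * (m * d) + s * d ≤ j) && decide (j < (k : Int) * (m * d) + s * d + d)) := by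
      apply List.filter_congr
      intro j hj
      have hb := (PySem.List.mem_pyRange_one).mp hj
      exact coord_iff d m s j k hd hm hb.1 (by omega)
    rw [hpred, filter_pyRange_interval _ _ _ _ (by nlinarith) (by omega) (by rw [hc]; nlinarith),
        map_add_pyRange_one]
    simp only [List.flatMap_cons, List.flatMap_nil, List.append_nil]
    congr 1 <;> ring

-- loop invariant of compute_strides' countdown loop: positions ≥ c already hold suffix products
theorem strides_fold_inv (sizes : List Int) (c : Nat) (hc : c < sizes.length ∨ c = 0)
    (st : List Int) (hlen : st.length = sizes.length)
    (hup : ∀ j : Nat, c ≤ j → j < sizes.length → st.getD j 0 = (sizes.drop (j + 1)).prod) :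
    ((PySem.List.pyRange ((c : Int) - 1) (-1) (-1)).foldl
        (fun st i =>
          st.set i.toNat (PySem.List.pyGetD st (i + 1) 0 * PySem.List.pyGetD sizes (i + 1) 0))
        st).length = sizes.length ∧
      ∀ j : Nat, j < sizes.length →
        ((PySem.List.pyRange ((c : Int) - 1) (-1) (-1)).foldl
          (fun st i =>
            st.set i.toNat (PySem.List.pyGetD st (i + 1) 0 * PySem.List.pyGetD sizes (i + 1) 0))
          st).getD j 0 = (sizes.drop (j + 1)).prod := by
  induction c generalizing st with
  | zero =>
    rw [PySem.List.pyRange_neg_one_eq_nil (by omega)]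
    exact ⟨hlen, fun j hj => hup j (Nat.zero_le j) hj⟩
  | succ c ih =>
    have hcl : c + 1 < sizes.length := by omega
    rw [show ((c + 1 : Nat) : Int) - 1 = (c : Int) from by push_cast; ring,
        PySem.List.pyRange_neg_one_cons (by omega : (-1 : Int) < (c : Int)),
        List.foldl_cons]
    set st' := st.set (c : Int).toNat
      (PySem.List.pyGetD st ((c : Int) + 1) 0 * PySem.List.pyGetD sizes ((c : Int) + 1) 0) with hst'
    have hget1 : PySem.List.pyGetD st ((c : Int) + 1) 0 = (sizes.drop (c + 2)).prod := by
      rw [show ((c : Int) + 1) = ((c + 1 : Nat) : Int) from by push_cast; ring,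
          PySem.List.pyGetD_of_nonneg _ _ (by positivity), Int.toNat_natCast]
      rw [hup (c + 1) (by omega) hcl]
    have hget2 : PySem.List.pyGetD sizes ((c : Int) + 1) 0 = sizes[c + 1]'hcl := by
      rw [show ((c : Int) + 1) = ((c + 1 : Nat) : Int) from by push_cast; ring,
          PySem.List.pyGetD_of_nonneg _ _ (by positivity), Int.toNat_natCast,
          List.getD_eq_getElem _ _ (by omega)]
    have hlen' : st'.length = sizes.length := by simp [hst', hlen]
    apply ih (Or.inl (by omega)) st' hlen'
    intro j hcj hj
    rcases Nat.eq_or_lt_of_le hcj with hec | hlt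
    · subst hec
      rw [hst', List.getD_eq_getElem _ _ (by simp [hlen]; omega)]
      rw [List.getElem_set]
      rw [if_pos (by simp)]
      rw [hget1, hget2]
      rw [List.drop_eq_getElem_cons hcl, List.prod_cons]
      ring
    · rw [hst', List.getD_eq_getElem _ _ (by simp [hlen]; omega), List.getElem_set,
          if_neg (by simp; omega)]
      have hjst : j < st.length := by omega
      have hv := hup j (by omega) hj
      rw [List.getD_eq_getElem _ _ hjst] at hv
      exact hv

-- compute_strides returns the suffix products
theorem compute_strides_getD (sizes : List Int) (i : Nat) (hi : i < sizes.length) :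
    PySem.List.pyGetD (compute_strides sizes) (i : Int) 0 = (sizes.drop (i + 1)).prod := by
  have h := strides_fold_inv sizes (sizes.length - 1) (Or.inl (by omega))
    (List.replicate sizes.length 1) (by simp)
    (fun j hj1 hj2 => by
      rw [List.getD_eq_getElem _ _ (by simp; omega), List.getElem_replicate]
      have hj : j + 1 = sizes.length := by omega
      rw [hj, List.drop_length, List.prod_nil])
  have hc : (((sizes.length - 1 : Nat) : Int)) - 1 = ((sizes.length : Int)) - 2 := by omega
  rw [hc] at h
  unfold compute_strides
  rw [PySem.List.pyGetD_of_nonneg _ _ (by positivity), Int.toNat_natCast]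
  exact h.2 i hi

-- reading bucket s of a cons-dispatch dict, generic invariant
theorem getD_foldl_modify_cons (l : List (Int × Int)) (d : PySem.Dict Int (List Int)) (c : Int) :
    (l.foldl (fun d p => d.modify p.1 [] (fun v => p.2 :: v)) d).getD c []
      = ((l.filter (fun p => p.1 == c)).map (fun p => p.2)).reverse ++ d.getD c [] := by
  induction l generalizing d with
  | nil => simp
  | cons p t ih =>
    simp only [List.foldl_cons, List.filter_cons]
    rw [ih]
    by_cases h : p.1 == c
    · have hc : c = p.1 := (beq_iff_eq.mp h).symm
      rw [if_pos h, PySem.Dict.getD_modify, if_pos hc]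
      simp [hc, List.append_assoc]
    · have hc : ¬ c = p.1 := fun e => h (beq_iff_eq.mpr e.symm)
      rw [if_neg h, PySem.Dict.getD_modify, if_neg hc]

-- reading bucket s of B's dispatch dict is "filter by coordinate, shift by off"
theorem dispatch_getD (d m off : Int) (l : List Int) (s : Int) :
    (((l.foldl (fun b j =>
        b.modify (PySem.Int.mod (PySem.Int.floordiv j d) m) [] (fun v => (j + off) :: v))
      (PySem.Dict.empty : PySem.Dict Int (List Int))).getD s []).reverse)
      = (l.filter (fun j => PySem.Int.mod (PySem.Int.floordiv j d) m == s)).map (fun j => j + off) := by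
  have h1 : (l.foldl (fun b j =>
        b.modify (PySem.Int.mod (PySem.Int.floordiv j d) m) [] (fun v => (j + off) :: v))
      (PySem.Dict.empty : PySem.Dict Int (List Int)))
      = ((l.map (fun j => (PySem.Int.mod (PySem.Int.floordiv j d) m, j + off))).foldl
          (fun b p => b.modify p.1 [] (fun v => p.2 :: v)) PySem.Dict.empty) := by
    rw [List.foldl_map]
  rw [h1, getD_foldl_modify_cons, List.filter_map, List.map_map]
  simp only [PySem.Dict.getD_empty, List.append_nil, List.reverse_reverse]
  rfl

theorem items_eq (sizes : List Int) (i : Nat) (hi : i < sizes.length)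
    (h1 : 0 < PySem.List.pyGetD sizes (i : Int) 0 → (sizes.drop (i + 1)).prod ≠ 0)
    (h2 : 0 < PySem.List.pyGetD sizes (i : Int) 0 → 0 < sizes.prod → 0 < (sizes.drop (i + 1)).prod)
    (off : Int) :
    (PySem.List.pyRange 0 (PySem.List.pyGetD sizes (i : Int) 0) 1).foldl (fun items s =>
        items ++ [(PySem.List.pyRange (s * PySem.List.pyGetD (compute_strides sizes) (i : Int) 0)
            (sizes.foldl (fun t s => t * s) 1)
            (PySem.List.pyGetD sizes (i : Int) 0 * PySem.List.pyGetD (compute_strides sizes) (i : Int) 0)).foldl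
          (fun r st => r ++ PySem.List.pyRange (st + off) (st + off + PySem.List.pyGetD (compute_strides sizes) (i : Int) 0) 1) []]) []
    = (PySem.List.pyRange 0 (PySem.List.pyGetD sizes (i : Int) 0) 1).map (fun s =>
        ((if 0 < PySem.List.pyGetD sizes (i : Int) 0 then
            (PySem.List.pyRange 0 (sizes.foldl (fun t s => t * s) 1) 1).foldl (fun b j =>
            b.modify (PySem.Int.mod (PySem.Int.floordiv j (PySem.List.pyGetD (compute_strides sizes) (i : Int) 0)) (PySem.List.pyGetD sizes (i : Int) 0)) [] (fun v => (j + off) :: v))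
              PySem.Dict.empty
          else PySem.Dict.empty).getD s []).reverse) := by
  set m := PySem.List.pyGetD sizes (i : Int) 0 with hm
  set d := PySem.List.pyGetD (compute_strides sizes) (i : Int) 0 with hd
  set T := sizes.foldl (fun t s => t * s) 1 with hT
  have hmval : m = sizes[i]'hi := by
    rw [hm, PySem.List.pyGetD_of_nonneg _ _ (by positivity), Int.toNat_natCast,
        List.getD_eq_getElem _ _ hi]
  have hdval : d = (sizes.drop (i + 1)).prod := compute_strides_getD sizes i hi
  have hTval : T = sizes.prod := by
    rw [hT, List.prod_eq_foldl]
  rw [PySem.List.foldl_append_singleton_eq_map, List.nil_append]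
  rcases le_or_gt m 0 with hm0 | hmpos
  · rw [PySem.List.pyRange_one_eq_nil hm0]
    simp
  · have hd0 : d ≠ 0 := by rw [hdval]; exact h1 hmpos
    rw [if_pos hmpos]
    apply List.map_congr_left
    intro s hsmem
    have hsb := (PySem.List.mem_pyRange_one).mp hsmem
    rw [PySem.List.foldl_append_eq_flatMap, List.nil_append, dispatch_getD]
    rcases lt_or_gt_of_ne hd0 with hdneg | hdpos
    · -- negative stride: every rollout block is empty, and the total is not positive
      have hTle : T ≤ 0 := by
        by_contra hc
        have := h2 hmpos (by rw [← hTval]; omega)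
        omega
      rw [PySem.List.pyRange_one_eq_nil hTle]
      simp only [List.filter_nil, List.map_nil]
      apply List.flatMap_eq_nil_iff.mpr
      intro st _
      exact PySem.List.pyRange_one_eq_nil (by omega)
    · rcases le_or_gt T 0 with hTle | hTpos
      · -- nothing to distribute: all ranges empty on both sides
        rw [PySem.List.pyRange_one_eq_nil hTle]
        simp only [List.filter_nil, List.map_nil]
        have hsd : 0 ≤ s * d := mul_nonneg hsb.1 (le_of_lt hdpos)
        have hstarts : PySem.List.pyRange (s * d) T (m * d) = [] := by
          rw [PySem.List.pyRange_of_pos _ _ (by positivity), if_neg (by omega)]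
          simp
        rw [hstarts]; simp
      · -- the main case: T = prefix * (m * d) with prefix > 0
        have hdecomp : T = (sizes.take i).prod * (m * d) := by
          rw [hTval, hmval, hdval]
          conv_lhs => rw [← List.take_append_drop i sizes]
          rw [List.prod_append, List.drop_eq_getElem_cons hi, List.prod_cons]
        have hmd : 0 < m * d := mul_pos hmpos hdpos
        have hprepos : 0 < (sizes.take i).prod := by nlinarith
        set k : Nat := ((sizes.take i).prod).toNat with hk
        have hkval : ((sizes.take i).prod) = (k : Int) := (Int.toNat_of_nonneg (le_of_lt hprepos)).symm
        have hTk : T = (k : Int) * (m * d) := by rw [hdecomp, hkval]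
        rw [hTk]
        exact bucket_eq d m off hdpos hmpos k s hsb.1 hsb.2

-- membership in enumerate gives the index bounds
theorem enum_fst_bounds (xs : List String) (p : Int × String)
    (hp : p ∈ PySem.List.enumerate xs) : 0 ≤ p.1 ∧ p.1 < xs.length := by
  have h : p.1 ∈ (PySem.List.enumerate xs).map (fun q => q.1) := List.mem_map_of_mem hp
  rw [PySem.List.map_fst_enumerate] at h
  have := (PySem.List.mem_pyRange_one).mp h
  omega

-- ===== VERDICT (by name: the statement is the Claim_ definition above) =====
theorem build_reverse_mapping_spec : Claim_equal_build_reverse_mapping := by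
  intro agent_names sizes batch_size _hdom hpre
  unfold Spec_build_reverse_mapping
  simp only [build_reverse_mapping, build_reverse_mapping_alt]
  rcases le_or_gt batch_size 0 with hbs | hbs
  · rw [PySem.List.pyRange_one_eq_nil hbs]
    rfl
  · obtain ⟨hlen, hag⟩ := hpre hbs
    congr 2
    apply PySem.List.foldl_congr_mem
    intro acc b _hb
    congr 1
    apply PySem.List.foldl_congr_mem
    intro acc2 p hp
    congr 1
    have hb := enum_fst_bounds agent_names p hp
    have hcast : p.1 = ((p.1.toNat : Nat) : Int) := (Int.toNat_of_nonneg hb.1).symm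
    rw [hcast]
    exact items_eq sizes p.1.toNat (by omega)
      (fun hpos => (hag p.1.toNat (by omega) hpos).1)
      (fun hpos => (hag p.1.toNat (by omega) hpos).2)
      (b * sizes.foldl (fun t s => t * s) 1)
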